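-- pv_equiv track=rewrite | github.com/cms-sw/cmssw | Validation/RecoTrack/python/plotting/trackingPlots.py | _trackingRefFileFallbackSLHC_Phase1PU140
-- ===== SOURCE A (Python) =====
-- def _trackingRefFileFallbackSLHC_Phase1PU140(path):
--     for (old, new) in [("initialStep",         "iter0"),
--                        ("highPtTripletStep",   "iter1"),
--                        ("lowPtQuadStep",       "iter2"),
--                        ("lowPtTripletStep",    "iter3"),
--                        ("detachedQuadStep",    "iter4"),
--                        ("pixelPairStep",       "iter5"),
--                        ("muonSeededStepInOut", "iter9"),
--                        ("muonSeededStepOutIn", "iter10")]: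
--         path = path.replace(old, new)
--     return path
-- ===== SOURCE B (Python) =====
-- import re
--
-- _SLHC_MAP = {"initialStep":         "iter0",
--              "highPtTripletStep":   "iter1",
--              "lowPtQuadStep":       "iter2",
--              "lowPtTripletStep":    "iter3",
--              "detachedQuadStep":    "iter4",
--              "pixelPairStep":       "iter5",
--              "muonSeededStepInOut": "iter9",
--              "muonSeededStepOutIn": "iter10"}
-- _SLHC_RE = re.compile("|".join(re.escape(k) for k in _SLHC_MAP))
--
-- def _trackingRefFileFallbackSLHC_Phase1PU140(path):
--     # one left-to-right scan; no key is a prefix/substring of another and no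
--     # replacement can create or take part in a new match, so this equals the
--     # eight sequential str.replace passes
--     return _SLHC_RE.sub(lambda m: _SLHC_MAP[m.group(0)], path)
-- ===== Notes on version B (the rewrite author's own statement) =====
-- stated objective: idiomatic
-- what changed: replaces the eight sequential full-string str.replace passes by one precompiled regex alternation that rewrites every occurrence in a single left-to-right scan
import Mathlib
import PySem

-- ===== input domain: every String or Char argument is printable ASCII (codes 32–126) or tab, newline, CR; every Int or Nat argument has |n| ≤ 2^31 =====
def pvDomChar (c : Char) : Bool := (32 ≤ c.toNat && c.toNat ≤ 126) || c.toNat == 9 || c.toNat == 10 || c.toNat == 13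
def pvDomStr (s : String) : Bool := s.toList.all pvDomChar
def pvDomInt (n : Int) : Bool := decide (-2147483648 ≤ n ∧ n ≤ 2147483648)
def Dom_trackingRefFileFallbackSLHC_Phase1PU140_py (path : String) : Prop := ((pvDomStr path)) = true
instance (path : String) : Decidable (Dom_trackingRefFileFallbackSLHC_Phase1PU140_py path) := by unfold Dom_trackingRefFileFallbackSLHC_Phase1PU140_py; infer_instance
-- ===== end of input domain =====

-- B replaces A's eight sequential full-string str.replace passes by one precompiled
-- regex alternation doing a single left-to-right scan; proved to return the same string.

-- ===== PORT A =====
def trackingRefFileFallbackSLHC_Phase1PU140_py (path : String) : String :=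
  [("initialStep",         "iter0"),
   ("highPtTripletStep",   "iter1"),
   ("lowPtQuadStep",       "iter2"),
   ("lowPtTripletStep",    "iter3"),
   ("detachedQuadStep",    "iter4"),
   ("pixelPairStep",       "iter5"),
   ("muonSeededStepInOut", "iter9"),
   ("muonSeededStepOutIn", "iter10")].foldl
    (fun p kn => PySem.Str.replace p kn.1 kn.2) path

-- ===== PORT B =====
-- Source B's _SLHC_MAP together with the alternation order of its compiled pattern
def pvSLHCKeys : List (List Char × List Char) :=
  [("initialStep".toList,         "iter0".toList),
   ("highPtTripletStep".toList,   "iter1".toList),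
   ("lowPtQuadStep".toList,       "iter2".toList),
   ("lowPtTripletStep".toList,    "iter3".toList),
   ("detachedQuadStep".toList,    "iter4".toList),
   ("pixelPairStep".toList,       "iter5".toList),
   ("muonSeededStepInOut".toList, "iter9".toList),
   ("muonSeededStepOutIn".toList, "iter10".toList)]

-- hand port of re.sub with an alternation of literal (escaped) strings: one
-- left-to-right scan; at each position the first listed alternative that matches is
-- replaced and the scan resumes after it (exact re semantics for literal alternations)
def pvSLHCScan : List Char → List Char
  | [] => []
  | c :: t =>
    match pvSLHCKeys.find? (fun kn => kn.1.isPrefixOf (c :: t)) with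
    | some kn => kn.2 ++ pvSLHCScan (t.drop (kn.1.length - 1))
    | none => c :: pvSLHCScan t
termination_by l => l.length
decreasing_by
  · simp only [List.length_cons, List.length_drop]; omega
  · simp only [List.length_cons]; omega

def trackingRefFileFallbackSLHC_Phase1PU140_py_alt (path : String) : String :=
  String.ofList (pvSLHCScan path.toList)

-- ===== PRECONDITION & SPEC =====
def Spec_trackingRefFileFallbackSLHC_Phase1PU140_py (path : String) (out : String) : Prop := out = trackingRefFileFallbackSLHC_Phase1PU140_py_alt path
instance (path : String) (out : String) : Decidable (Spec_trackingRefFileFallbackSLHC_Phase1PU140_py path out) := by unfold Spec_trackingRefFileFallbackSLHC_Phase1PU140_py; infer_instance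

-- ===== CLAIM (what is proved, stated in full; the proofs are below) =====
def Claim_equal_trackingRefFileFallbackSLHC_Phase1PU140_py : Prop := ∀ (path : String), Dom_trackingRefFileFallbackSLHC_Phase1PU140_py path → Spec_trackingRefFileFallbackSLHC_Phase1PU140_py path (trackingRefFileFallbackSLHC_Phase1PU140_py path)

-- ===== LEMMAS AND PROOFS =====

-- unfolding equations for PySem.Chars.replace.go
theorem pvGo_zero (o n l acc) : PySem.Chars.replace.go o n 0 l acc = acc.reverse ++ l := rfl
theorem pvGo_nil (o n f acc) : PySem.Chars.replace.go o n (f+1) [] acc = acc.reverse := rfl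
theorem pvGo_cons (o n f c t acc) : PySem.Chars.replace.go o n (f+1) (c::t) acc =
    if o.isPrefixOf (c::t) then PySem.Chars.replace.go o n f (List.drop o.length (c::t)) (n.reverse ++ acc)
    else PySem.Chars.replace.go o n f t (c::acc) := rfl

theorem pvGo_acc (o n : List Char) : ∀ (f : Nat) (l acc : List Char),
    PySem.Chars.replace.go o n f l acc = acc.reverse ++ PySem.Chars.replace.go o n f l [] := by
  intro f
  induction f with
  | zero => intro l acc; simp [pvGo_zero]
  | succ f ih =>
    intro l acc
    cases l with
    | nil => simp [pvGo_nil]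
    | cons c t =>
      rw [pvGo_cons, pvGo_cons]
      split
      · rw [ih _ (n.reverse ++ acc), ih _ (n.reverse ++ [])]; simp
      · rw [ih _ (c :: acc), ih _ (c :: [])]; simp

theorem pvGo_fuel (o n : List Char) (ho : o ≠ []) : ∀ (f f' : Nat) (l acc : List Char),
    l.length ≤ f → l.length ≤ f' →
    PySem.Chars.replace.go o n f l acc = PySem.Chars.replace.go o n f' l acc := by
  intro f
  induction f with
  | zero =>
    intro f' l acc h _
    have : l = [] := List.length_eq_zero_iff.mp (Nat.le_zero.mp h)
    subst this
    cases f' with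
    | zero => rfl
    | succ f' => simp [pvGo_zero, pvGo_nil]
  | succ f ih =>
    intro f' l acc h h'
    cases l with
    | nil =>
      cases f' with
      | zero => simp [pvGo_zero, pvGo_nil]
      | succ f' => rfl
    | cons c t =>
      cases f' with
      | zero => simp at h'
      | succ f' =>
        rw [pvGo_cons, pvGo_cons]
        have hol : 1 ≤ o.length := by
          cases o with
          | nil => exact absurd rfl ho
          | cons x xs => simp
        split
        · apply ih <;> simp_all <;> omega
        · apply ih <;> simp_all

theorem pvReplace_def (o n s : List Char) (ho : o ≠ []) :
    PySem.Chars.replace s o n = PySem.Chars.replace.go o n s.length s [] := by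
  rw [PySem.Chars.replace]
  simp [List.isEmpty_iff, ho]

theorem pvRc_nil (o n : List Char) (ho : o ≠ []) : PySem.Chars.replace [] o n = [] := by
  rw [pvReplace_def _ _ _ ho]; rfl

theorem pvRc_head (o n x : List Char) (ho : o ≠ []) :
    PySem.Chars.replace (o ++ x) o n = n ++ PySem.Chars.replace x o n := by
  rw [pvReplace_def _ _ _ ho, pvReplace_def _ _ _ ho]
  cases o with
  | nil => exact absurd rfl ho
  | cons a o' =>
    simp only [List.cons_append, List.length_cons]
    rw [pvGo_cons]
    have hpre : (a :: o').isPrefixOf (a :: (o' ++ x)) = true := by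
      rw [List.isPrefixOf_iff_prefix]
      exact ⟨x, by simp⟩
    rw [if_pos hpre]
    rw [show List.drop (a :: o').length (a :: (o' ++ x)) = x by simp]
    rw [pvGo_acc]
    simp only [List.append_nil, List.reverse_reverse]
    congr 1
    exact pvGo_fuel (a :: o') n ho _ _ _ _ (by simp) le_rfl

theorem pvRc_cons (o n : List Char) (c : Char) (t : List Char) (h : ¬ o <+: (c :: t)) :
    PySem.Chars.replace (c :: t) o n = c :: PySem.Chars.replace t o n := by
  have ho : o ≠ [] := by rintro rfl; exact h (List.nil_prefix)
  rw [pvReplace_def _ _ _ ho, pvReplace_def _ _ _ ho]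
  rw [List.length_cons, pvGo_cons]
  have hpre : o.isPrefixOf (c :: t) = false := by
    rw [Bool.eq_false_iff]
    intro hb
    exact h (List.isPrefixOf_iff_prefix.mp hb)
  rw [if_neg (by simp [hpre])]
  rw [pvGo_acc]
  rfl

-- a prefix of a ++ X is comparable with a
theorem pvPrefix_append_cases {u a X : List Char} (h : u <+: a ++ X) : u <+: a ∨ a <+: u := by
  rcases Nat.le_total u.length a.length with hle | hle
  · left
    have := List.prefix_iff_eq_take.mp h
    rw [List.take_append_of_le_length hle] at this
    exact this ▸ List.take_prefix _ _
  · right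
    have hu := List.prefix_iff_eq_take.mp h
    have : a = u.take a.length := by
      rw [hu, List.take_take, Nat.min_eq_left hle, List.take_append_of_le_length le_rfl, List.take_length]
    exact this ▸ List.take_prefix _ _

theorem pvNot_prefix_append {u a : List Char} (X : List Char) (h1 : ¬ u <+: a) (h2 : ¬ a <+: u) :
    ¬ u <+: a ++ X := fun h => (pvPrefix_append_cases h).elim h1 h2

theorem pvNotPrefixB {u s : List Char} (h : ¬ u <+: s) : u.isPrefixOf s = false := by
  rw [Bool.eq_false_iff]
  intro hb
  exact h (List.isPrefixOf_iff_prefix.mp hb)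

theorem pvIsPrefixB (u r : List Char) : u.isPrefixOf (u ++ r) = true := by
  rw [List.isPrefixOf_iff_prefix]
  exact ⟨r, rfl⟩

-- decidable side conditions, checked by `decide` on the concrete keys
def pvPassB (o a : List Char) : Bool :=
  (List.range a.length).all (fun p => !(o.isPrefixOf (a.drop p)) && !((a.drop p).isPrefixOf o))

theorem pvPassB_spec {o a : List Char} (h : pvPassB o a = true) :
    ∀ p, p < a.length → ¬ o <+: a.drop p ∧ ¬ a.drop p <+: o := by
  intro p hp
  have := List.all_eq_true.mp h p (List.mem_range.mpr hp)
  simp only [Bool.and_eq_true, Bool.not_eq_true', Bool.eq_false_iff] at this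
  refine ⟨fun hc => this.1 ?_, fun hc => this.2 ?_⟩
  · exact List.isPrefixOf_iff_prefix.mpr hc
  · exact List.isPrefixOf_iff_prefix.mpr hc

def pvSafeB (w n : List Char) : Bool :=
  (List.range w.length).all (fun q => !((w.drop q).isPrefixOf n) && !(n.isPrefixOf (w.drop q)))

def pvSafe (w n : List Char) : Prop :=
  ∀ q, w.drop q ≠ [] → ¬ w.drop q <+: n ∧ ¬ n <+: w.drop q

theorem pvSafeB_spec {w n : List Char} (h : pvSafeB w n = true) : pvSafe w n := by
  intro q hq
  have hqlt : q < w.length := by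
    by_contra hge
    exact hq (List.drop_eq_nil_of_le (Nat.le_of_not_lt hge))
  have := List.all_eq_true.mp h q (List.mem_range.mpr hqlt)
  simp only [Bool.and_eq_true, Bool.not_eq_true', Bool.eq_false_iff] at this
  refine ⟨fun hc => this.1 ?_, fun hc => this.2 ?_⟩
  · exact List.isPrefixOf_iff_prefix.mpr hc
  · exact List.isPrefixOf_iff_prefix.mpr hc

theorem pvSafe_drop_one {w n : List Char} (h : pvSafe w n) : pvSafe (w.drop 1) n := by
  intro q hq
  rw [List.drop_drop] at hq ⊢
  exact h (1 + q) hq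

-- replacement by (o, n) never creates a new prefix v (v "safe" against n)
theorem pvNoCreate (o n : List Char) (ho : o ≠ []) :
    ∀ (t v : List Char), pvSafe v n → ¬ v <+: t → ¬ v <+: PySem.Chars.replace t o n := by
  intro t
  induction t with
  | nil => intro v _ hv; rwa [pvRc_nil _ _ ho]
  | cons c t' ih =>
    intro v hsafe hv
    by_cases hp : o <+: (c :: t')
    · obtain ⟨x, hx⟩ := hp
      rw [← hx, pvRc_head _ _ _ ho]
      intro hcon
      have hvne : v ≠ [] := by rintro rfl; exact hv List.nil_prefix
      rcases pvPrefix_append_cases hcon with hc | hc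
      · exact (hsafe 0 (by simpa using hvne)).1 (by simpa using hc)
      · exact (hsafe 0 (by simpa using hvne)).2 (by simpa using hc)
    · rw [pvRc_cons _ _ _ _ hp]
      cases v with
      | nil => exact absurd List.nil_prefix hv
      | cons v0 v' =>
        intro hcon
        rw [List.cons_prefix_cons] at hcon
        rcases Decidable.em (v0 = c) with hv0 | hv0
        · have hnp : ¬ v' <+: t' := fun hvt' => hv (List.cons_prefix_cons.mpr ⟨hv0, hvt'⟩)
          exact ih v' (by simpa using pvSafe_drop_one hsafe) hnp hcon.2
        · exact hv0 hcon.1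

-- the sequential-replace fold, generalized over the key list
def pvSeqL (L : List (List Char × List Char)) (s : List Char) : List Char :=
  L.foldl (fun p kn => PySem.Chars.replace p kn.1 kn.2) s

theorem pvSeqL_append (L1 L2 : List (List Char × List Char)) (s : List Char) :
    pvSeqL (L1 ++ L2) s = pvSeqL L2 (pvSeqL L1 s) := by
  simp [pvSeqL, List.foldl_append]

-- keys of L incompatible with every position inside a: the fold passes a through
theorem pvSeqL_pass (L : List (List Char × List Char)) (a : List Char)
    (H : ∀ kn ∈ L, pvPassB kn.1 a = true) :
    ∀ X, pvSeqL L (a ++ X) = a ++ pvSeqL L X := by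
  induction L generalizing a with
  | nil => intro X; simp [pvSeqL]
  | cons kn L' ih =>
    intro X
    have hP := pvPassB_spec (H kn (by simp))
    have hstep : ∀ b X', (∀ p, p < b.length → ¬ kn.1 <+: b.drop p ∧ ¬ b.drop p <+: kn.1) →
        PySem.Chars.replace (b ++ X') kn.1 kn.2 = b ++ PySem.Chars.replace X' kn.1 kn.2 := by
      intro b
      induction b with
      | nil => intro X' _; simp
      | cons c b' ihb =>
        intro X' hH
        have h0 := hH 0 (by simp)
        simp only [List.drop_zero] at h0
        have hnp : ¬ kn.1 <+: c :: (b' ++ X') := by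
          simpa using pvNot_prefix_append X' h0.1 h0.2
        rw [List.cons_append, pvRc_cons _ _ _ _ hnp]
        rw [ihb X' (fun p hp => by simpa using hH (p + 1) (by simpa using hp))]
        rfl
    show pvSeqL L' (PySem.Chars.replace (a ++ X) kn.1 kn.2) = a ++ pvSeqL L' (PySem.Chars.replace X kn.1 kn.2)
    rw [hstep a X hP]
    exact ih a (fun kn' h' => H kn' (by simp [h'])) _

-- no key of L matches at the head: the fold passes the head character through
theorem pvSeqL_cons (L : List (List Char × List Char))
    (H2 : ∀ kn ∈ L, ∀ kn' ∈ L, pvSafeB kn.1 kn'.2 = true) (c : Char) :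
    ∀ t, (∀ kn ∈ L, ¬ kn.1 <+: (c :: t)) → pvSeqL L (c :: t) = c :: pvSeqL L t := by
  induction L with
  | nil => intro t _; simp [pvSeqL]
  | cons kn L' ih =>
    intro t H1
    have hh := H1 kn (by simp)
    have ho : kn.1 ≠ [] := by intro h; exact hh (h ▸ List.nil_prefix)
    show pvSeqL L' (PySem.Chars.replace (c :: t) kn.1 kn.2) = c :: pvSeqL L' (PySem.Chars.replace t kn.1 kn.2)
    rw [pvRc_cons _ _ _ _ hh]
    refine ih (fun a ha b hb => H2 a (by simp [ha]) b (by simp [hb])) _ ?_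
    intro kn' hkn'
    have hold := H1 kn' (by simp [hkn'])
    have hsafe : pvSafe kn'.1 kn.2 := pvSafeB_spec (H2 kn' (by simp [hkn']) kn (by simp))
    cases hv : kn'.1 with
    | nil => exact absurd (hv ▸ List.nil_prefix) hold
    | cons v0 v' =>
      rw [hv] at hold
      intro hcon
      rw [List.cons_prefix_cons] at hcon
      rcases Decidable.em (v0 = c) with hv0 | hv0
      · have hnp : ¬ v' <+: t := fun hvt => hold (List.cons_prefix_cons.mpr ⟨hv0, hvt⟩)
        exact pvNoCreate kn.1 kn.2 ho t v'
          (by simpa [hv] using pvSafe_drop_one (hv ▸ hsafe)) hnp hcon.2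
      · exact hv0 hcon.1

-- key k (replacement n) matches at the head: the whole fold rewrites it to n
theorem pvSeqL_split (L1 L2 : List (List Char × List Char)) (k n r : List Char) (hk : k ≠ [])
    (H1 : ∀ kn ∈ L1, pvPassB kn.1 k = true) (H2 : ∀ kn ∈ L2, pvPassB kn.1 n = true) :
    pvSeqL (L1 ++ (k, n) :: L2) (k ++ r) = n ++ pvSeqL (L1 ++ (k, n) :: L2) r := by
  rw [pvSeqL_append, pvSeqL_append, pvSeqL_pass L1 k H1 r]
  show pvSeqL L2 (PySem.Chars.replace (k ++ pvSeqL L1 r) k n)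
      = n ++ pvSeqL L2 (PySem.Chars.replace (pvSeqL L1 r) k n)
  rw [pvRc_head _ _ _ hk]
  exact pvSeqL_pass L2 n H2 _

-- scan side: head match
theorem pvScan_head (k n r : List Char) (hk : k ≠ [])
    (hf : pvSLHCKeys.find? (fun kn => kn.1.isPrefixOf (k ++ r)) = some (k, n)) :
    pvSLHCScan (k ++ r) = n ++ pvSLHCScan r := by
  cases k with
  | nil => exact absurd rfl hk
  | cons c k' =>
    rw [List.cons_append, pvSLHCScan, ← List.cons_append, hf]
    simp

-- one induction step, packaged for the eight head-match branches
theorem pvBranch (L1 L2 : List (List Char × List Char)) (k n r : List Char)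
    (hK : pvSLHCKeys = L1 ++ (k, n) :: L2) (hk : k ≠ [])
    (H1 : ∀ kn ∈ L1, pvPassB kn.1 k = true) (H2 : ∀ kn ∈ L2, pvPassB kn.1 n = true)
    (hf : pvSLHCKeys.find? (fun kn => kn.1.isPrefixOf (k ++ r)) = some (k, n))
    (ih : pvSeqL pvSLHCKeys r = pvSLHCScan r) :
    pvSeqL pvSLHCKeys (k ++ r) = pvSLHCScan (k ++ r) := by
  rw [pvScan_head k n r hk hf, hK, pvSeqL_split L1 L2 k n r hk H1 H2, ← hK, ih]

-- the main equivalence on character lists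
theorem pvSeq_eq_scan : ∀ s : List Char, pvSeqL pvSLHCKeys s = pvSLHCScan s := by
  have key : ∀ N : Nat, ∀ s : List Char, s.length ≤ N → pvSeqL pvSLHCKeys s = pvSLHCScan s := by
    intro N
    induction N with
    | zero =>
      intro s hs
      have h : s = [] := List.length_eq_zero_iff.mp (Nat.le_zero.mp hs)
      subst h
      have hsc : pvSLHCScan [] = [] := by rw [pvSLHCScan]
      rw [hsc]; decide
    | succ N ih =>
      intro s hs
      cases s with
      | nil =>
        have hsc : pvSLHCScan [] = [] := by rw [pvSLHCScan]
        rw [hsc]; decide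
      | cons c t =>
        by_cases h0 : "initialStep".toList <+: (c :: t)
        · obtain ⟨r, hr⟩ := h0
          rw [← hr] at hs ⊢
          refine pvBranch (pvSLHCKeys.take 0) (pvSLHCKeys.drop 1) ("initialStep".toList) ("iter0".toList) r (by decide) (by decide) (by decide) (by decide) ?_ (ih r ?_)
          · simp only [pvSLHCKeys, List.find?, pvIsPrefixB]
          · have hkl : ("initialStep".toList).length = 11 := by decide
            rw [List.length_append, hkl] at hs
            omega
        by_cases h1 : "highPtTripletStep".toList <+: (c :: t)
        · obtain ⟨r, hr⟩ := h1
          rw [← hr] at h0 hs ⊢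
          refine pvBranch (pvSLHCKeys.take 1) (pvSLHCKeys.drop 2) ("highPtTripletStep".toList) ("iter1".toList) r (by decide) (by decide) (by decide) (by decide) ?_ (ih r ?_)
          · simp only [pvSLHCKeys, List.find?, pvNotPrefixB h0, pvIsPrefixB]
          · have hkl : ("highPtTripletStep".toList).length = 17 := by decide
            rw [List.length_append, hkl] at hs
            omega
        by_cases h2 : "lowPtQuadStep".toList <+: (c :: t)
        · obtain ⟨r, hr⟩ := h2
          rw [← hr] at h0 h1 hs ⊢
          refine pvBranch (pvSLHCKeys.take 2) (pvSLHCKeys.drop 3) ("lowPtQuadStep".toList) ("iter2".toList) r (by decide) (by decide) (by decide) (by decide) ?_ (ih r ?_)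
          · simp only [pvSLHCKeys, List.find?, pvNotPrefixB h0, pvNotPrefixB h1, pvIsPrefixB]
          · have hkl : ("lowPtQuadStep".toList).length = 13 := by decide
            rw [List.length_append, hkl] at hs
            omega
        by_cases h3 : "lowPtTripletStep".toList <+: (c :: t)
        · obtain ⟨r, hr⟩ := h3
          rw [← hr] at h0 h1 h2 hs ⊢
          refine pvBranch (pvSLHCKeys.take 3) (pvSLHCKeys.drop 4) ("lowPtTripletStep".toList) ("iter3".toList) r (by decide) (by decide) (by decide) (by decide) ?_ (ih r ?_)
          · simp only [pvSLHCKeys, List.find?, pvNotPrefixB h0, pvNotPrefixB h1, pvNotPrefixB h2, pvIsPrefixB]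
          · have hkl : ("lowPtTripletStep".toList).length = 16 := by decide
            rw [List.length_append, hkl] at hs
            omega
        by_cases h4 : "detachedQuadStep".toList <+: (c :: t)
        · obtain ⟨r, hr⟩ := h4
          rw [← hr] at h0 h1 h2 h3 hs ⊢
          refine pvBranch (pvSLHCKeys.take 4) (pvSLHCKeys.drop 5) ("detachedQuadStep".toList) ("iter4".toList) r (by decide) (by decide) (by decide) (by decide) ?_ (ih r ?_)
          · simp only [pvSLHCKeys, List.find?, pvNotPrefixB h0, pvNotPrefixB h1, pvNotPrefixB h2, pvNotPrefixB h3, pvIsPrefixB]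
          · have hkl : ("detachedQuadStep".toList).length = 16 := by decide
            rw [List.length_append, hkl] at hs
            omega
        by_cases h5 : "pixelPairStep".toList <+: (c :: t)
        · obtain ⟨r, hr⟩ := h5
          rw [← hr] at h0 h1 h2 h3 h4 hs ⊢
          refine pvBranch (pvSLHCKeys.take 5) (pvSLHCKeys.drop 6) ("pixelPairStep".toList) ("iter5".toList) r (by decide) (by decide) (by decide) (by decide) ?_ (ih r ?_)
          · simp only [pvSLHCKeys, List.find?, pvNotPrefixB h0, pvNotPrefixB h1, pvNotPrefixB h2, pvNotPrefixB h3, pvNotPrefixB h4, pvIsPrefixB]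
          · have hkl : ("pixelPairStep".toList).length = 13 := by decide
            rw [List.length_append, hkl] at hs
            omega
        by_cases h6 : "muonSeededStepInOut".toList <+: (c :: t)
        · obtain ⟨r, hr⟩ := h6
          rw [← hr] at h0 h1 h2 h3 h4 h5 hs ⊢
          refine pvBranch (pvSLHCKeys.take 6) (pvSLHCKeys.drop 7) ("muonSeededStepInOut".toList) ("iter9".toList) r (by decide) (by decide) (by decide) (by decide) ?_ (ih r ?_)
          · simp only [pvSLHCKeys, List.find?, pvNotPrefixB h0, pvNotPrefixB h1, pvNotPrefixB h2, pvNotPrefixB h3, pvNotPrefixB h4, pvNotPrefixB h5, pvIsPrefixB]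
          · have hkl : ("muonSeededStepInOut".toList).length = 19 := by decide
            rw [List.length_append, hkl] at hs
            omega
        by_cases h7 : "muonSeededStepOutIn".toList <+: (c :: t)
        · obtain ⟨r, hr⟩ := h7
          rw [← hr] at h0 h1 h2 h3 h4 h5 h6 hs ⊢
          refine pvBranch (pvSLHCKeys.take 7) (pvSLHCKeys.drop 8) ("muonSeededStepOutIn".toList) ("iter10".toList) r (by decide) (by decide) (by decide) (by decide) ?_ (ih r ?_)
          · simp only [pvSLHCKeys, List.find?, pvNotPrefixB h0, pvNotPrefixB h1, pvNotPrefixB h2, pvNotPrefixB h3, pvNotPrefixB h4, pvNotPrefixB h5, pvNotPrefixB h6, pvIsPrefixB]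
          · have hkl : ("muonSeededStepOutIn".toList).length = 19 := by decide
            rw [List.length_append, hkl] at hs
            omega
        have hf : pvSLHCKeys.find? (fun kn => kn.1.isPrefixOf (c :: t)) = none := by
          simp only [pvSLHCKeys, List.find?, pvNotPrefixB h0, pvNotPrefixB h1, pvNotPrefixB h2, pvNotPrefixB h3, pvNotPrefixB h4, pvNotPrefixB h5, pvNotPrefixB h6, pvNotPrefixB h7]
        have hsc : pvSLHCScan (c :: t) = c :: pvSLHCScan t := by
          rw [pvSLHCScan, hf]
        rw [hsc]
        rw [pvSeqL_cons pvSLHCKeys (by decide) c t ?_]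
        · rw [ih t (by simp only [List.length_cons] at hs; omega)]
        · intro kn hkn
          simp only [pvSLHCKeys, List.mem_cons, List.not_mem_nil, or_false] at hkn
          rcases hkn with h|h|h|h|h|h|h|h <;> subst h
          · exact h0
          · exact h1
          · exact h2
          · exact h3
          · exact h4
          · exact h5
          · exact h6
          · exact h7
  intro s
  exact key s.length s le_rfl

-- String-level bridge for port A
theorem pvA_eq_seq (path : String) :
    trackingRefFileFallbackSLHC_Phase1PU140_py path = String.ofList (pvSeqL pvSLHCKeys path.toList) := by
  simp [trackingRefFileFallbackSLHC_Phase1PU140_py, pvSeqL, pvSLHCKeys, List.foldl, PySem.Str.replace]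

-- ===== VERDICT (by name: the statement is the Claim_ definition above) =====
theorem trackingRefFileFallbackSLHC_Phase1PU140_py_spec : Claim_equal_trackingRefFileFallbackSLHC_Phase1PU140_py := by
  intro path _
  show trackingRefFileFallbackSLHC_Phase1PU140_py path = trackingRefFileFallbackSLHC_Phase1PU140_py_alt path
  rw [pvA_eq_seq, pvSeq_eq_scan]
  rfl
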